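-- pv_equiv track=rewrite | github.com/jamesfulford/misc-software | Public Data Hacking/code/potholes/Potholes in Chicago.py | bestStretch
-- ===== SOURCE A (Python) =====
-- stretchWidth = 10
--
-- def getHoles(listOfBlocks, blockNumber):
--     """
--     returns how many holes a particular block has, given a list of
--     blocks on a street and which blocknumber it is.
--     """
--     for block in listOfBlocks:
--         if block[0] == blockNumber:
--             return block[1]
--     return 0
--
-- def getMinBlock(listOfBlocks):
--     """
--     returns the lowest block number on a street.
--     West and South count as negative.
--     """
--     small = 100000000  # really big!
--     for block in listOfBlocks:
--         small = min(small, block[0])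
--     return small
--
-- def getMaxBlock(listOfBlocks):
--     """
--     returns the highest block number on a street.
--     West and South count as negative.
--     """
--     big = -1000000000  # really not big!
--     for block in listOfBlocks:
--         big = max(big, block[0])
--     return big
--
-- def bestStretch(listOfBlocks):
--     """
--     returns a tuple that holds information on the best stretch of
--     blocks on the provided street:
--         [0] is how many holes are in this stretch
--         [1] is where the best stretch begins (block number)
--         [2] is where the best stretch ends (block number)
--     """
--     mostHoles = 0
--     bestStartBlock = 0
--     bestEndBlock = 0
--     for i in range(getMinBlock(listOfBlocks), getMaxBlock(listOfBlocks)):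
--         potholes = 0
--         for j in range(i, i + stretchWidth):
--             potholes += getHoles(listOfBlocks, j)
--         if potholes > mostHoles:
--             mostHoles = potholes
--             bestStartBlock = i
--             bestEndBlock = i + stretchWidth
--     return (mostHoles, bestStartBlock, bestEndBlock)
-- ===== SOURCE B (Python) =====
-- stretchWidth = 10
--
-- def bestStretch(listOfBlocks):
--     if not listOfBlocks:
--         return (0, 0, 0)
--     holes = {}
--     for block in listOfBlocks:
--         holes.setdefault(block[0], block[1])
--     lo = min(holes)
--     hi = max(holes)
--     best = (0, 0, 0)
--     w = 0
--     for j in range(lo, lo + stretchWidth):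
--         w += holes.get(j, 0)
--     for i in range(lo, hi):
--         if w > best[0]:
--             best = (w, i, i + stretchWidth)
--         w += holes.get(i + stretchWidth, 0) - holes.get(i, 0)
--     return best
-- ===== Notes on version B (the rewrite author's own statement) =====
-- stated objective: faster
-- what changed: B replaces A's rescans (a linear getHoles lookup for each of the 10 cells of every candidate window plus min/max passes) by one first-wins dict built in a single pass and a sliding-window running sum over the block range.
-- outside the precondition, e.g. on bestStretch([[5]]): A returns (0, 0, 0), B raises IndexError; on bestStretch([[-1000000002, 7]]): A returns (7, -1000000002, -999999992), B returns (0, 0, 0)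
import Mathlib
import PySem

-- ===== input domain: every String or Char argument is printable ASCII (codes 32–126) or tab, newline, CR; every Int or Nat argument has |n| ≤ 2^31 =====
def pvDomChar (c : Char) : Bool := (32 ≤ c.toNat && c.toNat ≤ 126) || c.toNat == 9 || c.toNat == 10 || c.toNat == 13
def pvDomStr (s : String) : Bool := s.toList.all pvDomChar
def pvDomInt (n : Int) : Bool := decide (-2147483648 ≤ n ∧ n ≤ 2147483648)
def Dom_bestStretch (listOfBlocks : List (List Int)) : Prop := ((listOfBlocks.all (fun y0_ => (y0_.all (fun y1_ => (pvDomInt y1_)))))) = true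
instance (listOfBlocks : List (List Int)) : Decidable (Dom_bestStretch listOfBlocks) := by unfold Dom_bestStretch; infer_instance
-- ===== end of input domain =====

-- B builds the hole counts into one first-wins dict and slides a running window
-- sum over the block range, instead of A's per-window linear rescans.
-- block[0] / block[1] are ported as (pyGet? …).getD 0; Pre_ keeps every block at
-- length ≥ 2, so the default is never taken on admitted inputs.

def stretchWidth : Int := 10

-- ===== PORT A =====
def getHoles (listOfBlocks : List (List Int)) (blockNumber : Int) : Int :=
  match listOfBlocks with
  | [] => 0
  | block :: rest =>
    if (PySem.List.pyGet? block 0).getD 0 = blockNumber then (PySem.List.pyGet? block 1).getD 0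
    else getHoles rest blockNumber

def getMinBlock (listOfBlocks : List (List Int)) : Int :=
  listOfBlocks.foldl (fun small block => min small ((PySem.List.pyGet? block 0).getD 0)) 100000000

def getMaxBlock (listOfBlocks : List (List Int)) : Int :=
  listOfBlocks.foldl (fun big block => max big ((PySem.List.pyGet? block 0).getD 0)) (-1000000000)

def bestStretch (listOfBlocks : List (List Int)) : Int × Int × Int :=
  (PySem.List.pyRange (getMinBlock listOfBlocks) (getMaxBlock listOfBlocks) 1).foldl
    (fun st i =>
      let potholes := (PySem.List.pyRange i (i + stretchWidth) 1).foldl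
        (fun p j => p + getHoles listOfBlocks j) 0
      if potholes > st.1 then (potholes, i, i + stretchWidth) else st)
    (0, 0, 0)

-- ===== PORT B =====
def bestStretch_alt (listOfBlocks : List (List Int)) : Int × Int × Int :=
  if listOfBlocks = [] then (0, 0, 0) else
  let holes := listOfBlocks.foldl
    (fun d block =>
      PySem.Dict.setdefault d ((PySem.List.pyGet? block 0).getD 0) ((PySem.List.pyGet? block 1).getD 0))
    PySem.Dict.empty
  let lo := (PySem.List.min? holes.keys (fun x => x)).getD 0   -- min(holes): keys nonempty here, the default is never taken
  let hi := (PySem.List.max? holes.keys (fun x => x)).getD 0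
  let w0 := (PySem.List.pyRange lo (lo + stretchWidth) 1).foldl (fun w j => w + holes.getD j 0) 0
  ((PySem.List.pyRange lo hi 1).foldl
    (fun (st : (Int × Int × Int) × Int) i =>
      (if st.2 > st.1.1 then (st.2, i, i + stretchWidth) else st.1,
       st.2 + holes.getD (i + stretchWidth) 0 - holes.getD i 0))
    ((0, 0, 0), w0)).1

-- ===== PRECONDITION & SPEC =====
-- Pre_ requires every block to be a [number, holes] pair of length ≥ 2 (on shorter
-- blocks A raises IndexError, or returns only because the missing entry is never
-- read, while B always reads it and raises), and, on nonempty input, at least one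
-- block number ≤ 10^8 and at least one ≥ -10^9: beyond those sentinel constants
-- A's getMinBlock/getMaxBlock return the sentinel instead of the true extremum
-- and scan an accidental range.
def Pre_bestStretch (listOfBlocks : List (List Int)) : Prop :=
  (∀ b ∈ listOfBlocks, 2 ≤ b.length) ∧
  (listOfBlocks ≠ [] →
    (∃ b ∈ listOfBlocks, b.headI ≤ 100000000) ∧ (∃ b ∈ listOfBlocks, -1000000000 ≤ b.headI))
instance (listOfBlocks : List (List Int)) : Decidable (Pre_bestStretch listOfBlocks) := by
  unfold Pre_bestStretch; infer_instance

def pvWitness_bestStretch : List (List Int) := [[1, 3], [2, 4], [15, 2]]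

def Spec_bestStretch (listOfBlocks : List (List Int)) (out : Int × Int × Int) : Prop := out = bestStretch_alt listOfBlocks
instance (listOfBlocks : List (List Int)) (out : Int × Int × Int) : Decidable (Spec_bestStretch listOfBlocks out) := by unfold Spec_bestStretch; infer_instance

-- ===== CLAIM (what is proved, stated in full; the proofs are below) =====
def Claim_equal_bestStretch : Prop := ∀ (listOfBlocks : List (List Int)), Dom_bestStretch listOfBlocks → Pre_bestStretch listOfBlocks → Spec_bestStretch listOfBlocks (bestStretch listOfBlocks)

-- ===== LEMMAS AND PROOFS =====

-- the first entry of a block, as both ports read it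
def keyOf (b : List Int) : Int := (PySem.List.pyGet? b 0).getD 0

theorem keyOf_eq_headI (b : List Int) : keyOf b = b.headI := by
  cases b with
  | nil => simp [keyOf, PySem.List.pyGet?]
  | cons x xs => simpa [keyOf] using PySem.List.pyGet?_zero_cons x xs

-- the dict B builds
def buildD (l : List (List Int)) : PySem.Dict Int Int :=
  l.foldl
    (fun d block =>
      PySem.Dict.setdefault d ((PySem.List.pyGet? block 0).getD 0) ((PySem.List.pyGet? block 1).getD 0))
    PySem.Dict.empty

theorem setdefault_eq (d : PySem.Dict Int Int) (k v : Int) :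
    PySem.Dict.setdefault d k v = if d.contains k then d else d.insert k v := by
  unfold PySem.Dict.setdefault
  split
  · rfl
  · next h =>
    have hi : (d.insert k v).items = d.items ++ [(k, v)] :=
      PySem.Dict.items_insert_of_not_contains d v (by simpa using h)
    cases hd : d.insert k v with
    | mk items => rw [hd] at hi; simp_all

theorem lookup_aux (l : List (List Int)) : ∀ (d : PySem.Dict Int Int) (k : Int),
    (l.foldl (fun d block =>
      PySem.Dict.setdefault d ((PySem.List.pyGet? block 0).getD 0) ((PySem.List.pyGet? block 1).getD 0)) d).getD k 0
    = if d.contains k then d.getD k 0 else getHoles l k := by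
  induction l with
  | nil =>
    intro d k
    simp only [List.foldl_nil, getHoles]
    by_cases hc : d.contains k = true
    · rw [if_pos hc]
    · rw [if_neg hc, PySem.Dict.getD_of_not_contains]
      simpa using hc
  | cons b rest ih =>
    intro d k
    rw [List.foldl_cons, ih, setdefault_eq]
    by_cases hc : d.contains ((PySem.List.pyGet? b 0).getD 0) = true
    · rw [if_pos hc]
      by_cases hk : (PySem.List.pyGet? b 0).getD 0 = k
      · subst hk
        rw [if_pos hc, getHoles]
        simp only [if_pos rfl]
        rw [if_pos hc]
      · rw [getHoles]
        simp only [if_neg hk]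
    · rw [if_neg hc]
      by_cases hk : k = (PySem.List.pyGet? b 0).getD 0
      · subst hk
        rw [if_pos (PySem.Dict.contains_insert_self _ _ _), PySem.Dict.getD_insert_self,
          if_neg hc, getHoles]
        simp
      · have hcc : (d.insert ((PySem.List.pyGet? b 0).getD 0) ((PySem.List.pyGet? b 1).getD 0)).contains k = d.contains k := by
          rw [PySem.Dict.contains_insert]
          simp [hk]
        rw [hcc, PySem.Dict.getD_insert_of_ne (hne := hk), getHoles]
        simp only [if_neg (fun h : (PySem.List.pyGet? b 0).getD 0 = k => hk h.symm)]

theorem buildD_getD (l : List (List Int)) (k : Int) : (buildD l).getD k 0 = getHoles l k := by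
  rw [buildD, lookup_aux]
  simp [PySem.Dict.contains_empty]

theorem keys_aux (l : List (List Int)) : ∀ (d : PySem.Dict Int Int) (k : Int),
    (k ∈ (l.foldl (fun d block =>
      PySem.Dict.setdefault d ((PySem.List.pyGet? block 0).getD 0) ((PySem.List.pyGet? block 1).getD 0)) d).keys)
    ↔ (k ∈ d.keys ∨ k ∈ l.map List.headI) := by
  induction l with
  | nil => intro d k; simp
  | cons b rest ih =>
    intro d k
    rw [List.foldl_cons, ih, setdefault_eq]
    have hb : (PySem.List.pyGet? b 0).getD 0 = b.headI := keyOf_eq_headI b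
    by_cases hc : d.contains ((PySem.List.pyGet? b 0).getD 0) = true
    · rw [if_pos hc]
      have : b.headI ∈ d.keys := by
        rw [← hb]
        exact (PySem.Dict.contains_iff_mem_keys _ _).mp hc
      simp only [List.map_cons, List.mem_cons]
      constructor
      · rintro (h | h)
        · exact Or.inl h
        · exact Or.inr (Or.inr h)
      · rintro (h | h | h)
        · exact Or.inl h
        · exact Or.inl (h ▸ this)
        · exact Or.inr h
    · rw [if_neg hc]
      rw [PySem.Dict.mem_keys_insert, hb]
      simp only [List.map_cons, List.mem_cons]
      tauto

theorem mem_keys_buildD (l : List (List Int)) (k : Int) :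
    k ∈ (buildD l).keys ↔ k ∈ l.map List.headI := by
  rw [buildD, keys_aux]
  simp [PySem.Dict.keys_empty]

theorem foldl_min_spec (xs : List Int) (a : Int) :
    (xs.foldl min a = a ∨ xs.foldl min a ∈ xs) ∧ xs.foldl min a ≤ a ∧ ∀ x ∈ xs, xs.foldl min a ≤ x := by
  induction xs generalizing a with
  | nil => simp
  | cons x t ih =>
    obtain ⟨h1, h2, h3⟩ := ih (min a x)
    refine ⟨?_, ?_, ?_⟩
    · rcases h1 with h | h
      · rw [List.foldl_cons, h]
        rcases le_total a x with hle | hle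
        · exact Or.inl (min_eq_left hle)
        · exact Or.inr (by simp [min_eq_right hle])
      · exact Or.inr (List.mem_cons_of_mem _ h)
    · exact le_trans h2 (min_le_left _ _)
    · intro y hy
      rcases List.mem_cons.mp hy with rfl | hy
      · exact le_trans h2 (min_le_right _ _)
      · exact h3 y hy

theorem foldl_max_spec (xs : List Int) (a : Int) :
    (xs.foldl max a = a ∨ xs.foldl max a ∈ xs) ∧ a ≤ xs.foldl max a ∧ ∀ x ∈ xs, x ≤ xs.foldl max a := by
  induction xs generalizing a with
  | nil => simp
  | cons x t ih =>
    obtain ⟨h1, h2, h3⟩ := ih (max a x)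
    refine ⟨?_, ?_, ?_⟩
    · rcases h1 with h | h
      · rw [List.foldl_cons, h]
        rcases le_total a x with hle | hle
        · exact Or.inr (by simp [max_eq_right hle])
        · exact Or.inl (max_eq_left hle)
      · exact Or.inr (List.mem_cons_of_mem _ h)
    · exact le_trans (le_max_left _ _) h2
    · intro y hy
      rcases List.mem_cons.mp hy with rfl | hy
      · exact le_trans (le_max_right _ _) h2
      · exact h3 y hy

theorem getMinBlock_eq (l : List (List Int)) :
    getMinBlock l = (l.map List.headI).foldl min 100000000 := by
  rw [getMinBlock, List.foldl_map]
  congr 1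
  funext a b
  rw [← keyOf_eq_headI]
  rfl

theorem getMaxBlock_eq (l : List (List Int)) :
    getMaxBlock l = (l.map List.headI).foldl max (-1000000000) := by
  rw [getMaxBlock, List.foldl_map]
  congr 1
  funext a b
  rw [← keyOf_eq_headI]
  rfl

theorem min?_keys_eq (l : List (List Int)) (hne : l ≠ [])
    (hex : ∃ b ∈ l, b.headI ≤ 100000000) :
    PySem.List.min? (buildD l).keys (fun x => x) = some (getMinBlock l) := by
  obtain ⟨m', hm'⟩ : ∃ m', PySem.List.min? (buildD l).keys (fun x => x) = some m' := by
    cases h : PySem.List.min? (buildD l).keys (fun x => x) with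
    | none =>
      exfalso
      have hkeys := (PySem.List.min?_eq_none_iff _ _).mp h
      obtain ⟨b, hb⟩ := List.exists_mem_of_ne_nil l hne
      have : b.headI ∈ (buildD l).keys := (mem_keys_buildD l _).mpr (List.mem_map_of_mem hb)
      simp_all
    | some m' => exact ⟨m', rfl⟩
  obtain ⟨hm, hmle, h13⟩ := foldl_min_spec (l.map List.headI) 100000000
  set m := (l.map List.headI).foldl min 100000000 with hmdef
  have hmmem : m ∈ l.map List.headI := by
    rcases hm with h | h
    · obtain ⟨b, hb, hble⟩ := hex
      have hb' : b.headI ∈ l.map List.headI := List.mem_map_of_mem hb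
      have h1 : m ≤ b.headI := h13 _ hb'
      have : b.headI = m := le_antisymm (by omega) h1
      rw [← this]; exact hb'
    · exact h
  have h1 : m' ∈ (buildD l).keys := PySem.List.min?_mem hm'
  have h2 := PySem.List.min?_isMin hm'
  have hmm : m' = m := by
    have ha : m' ≤ m := h2 _ ((mem_keys_buildD l _).mpr hmmem)
    have hb : m ≤ m' := h13 _ ((mem_keys_buildD l _).mp h1)
    omega
  rw [hm', hmm, getMinBlock_eq]

theorem max?_keys_eq (l : List (List Int)) (hne : l ≠ [])
    (hex : ∃ b ∈ l, -1000000000 ≤ b.headI) :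
    PySem.List.max? (buildD l).keys (fun x => x) = some (getMaxBlock l) := by
  obtain ⟨m', hm'⟩ : ∃ m', PySem.List.max? (buildD l).keys (fun x => x) = some m' := by
    cases h : PySem.List.max? (buildD l).keys (fun x => x) with
    | none =>
      exfalso
      have hkeys := (PySem.List.max?_eq_none_iff _ _).mp h
      obtain ⟨b, hb⟩ := List.exists_mem_of_ne_nil l hne
      have : b.headI ∈ (buildD l).keys := (mem_keys_buildD l _).mpr (List.mem_map_of_mem hb)
      simp_all
    | some m' => exact ⟨m', rfl⟩
  obtain ⟨hm, hmle, h13⟩ := foldl_max_spec (l.map List.headI) (-1000000000)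
  set m := (l.map List.headI).foldl max (-1000000000) with hmdef
  have hmmem : m ∈ l.map List.headI := by
    rcases hm with h | h
    · obtain ⟨b, hb, hble⟩ := hex
      have hb' : b.headI ∈ l.map List.headI := List.mem_map_of_mem hb
      have h1 : b.headI ≤ m := h13 _ hb'
      have : b.headI = m := le_antisymm h1 (by omega)
      rw [← this]; exact hb'
    · exact h
  have h1 : m' ∈ (buildD l).keys := PySem.List.max?_mem hm'
  have h2 := PySem.List.max?_isMax hm'
  have hmm : m' = m := by
    have ha : m ≤ m' := h2 _ ((mem_keys_buildD l _).mpr hmmem)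
    have hb : m' ≤ m := h13 _ ((mem_keys_buildD l _).mp h1)
    omega
  rw [hm', hmm, getMaxBlock_eq]

-- A's inner window sum
def P (l : List (List Int)) (i : Int) : Int :=
  (PySem.List.pyRange i (i + stretchWidth) 1).foldl (fun p j => p + getHoles l j) 0

theorem P_eq_sum (l : List (List Int)) (i : Int) :
    P l i = ((PySem.List.pyRange i (i + stretchWidth) 1).map (getHoles l)).sum := by
  rw [P, PySem.List.foldl_add]
  simp

theorem P_slide (l : List (List Int)) (i : Int) :
    P l (i + 1) = P l i + getHoles l (i + stretchWidth) - getHoles l i := by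
  rw [P_eq_sum, P_eq_sum]
  have h1 : PySem.List.pyRange i (i + stretchWidth) 1 = i :: PySem.List.pyRange (i + 1) (i + stretchWidth) 1 :=
    PySem.List.pyRange_one_cons (by simp [stretchWidth])
  have h2 : PySem.List.pyRange (i + 1) (i + 1 + stretchWidth) 1
      = PySem.List.pyRange (i + 1) (i + stretchWidth) 1 ++ [i + stretchWidth] := by
    have : i + 1 + stretchWidth = (i + stretchWidth) + 1 := by ring
    rw [this, PySem.List.pyRange_one_succ_right (by simp [stretchWidth])]
  rw [h1, h2]
  simp only [List.map_cons, List.sum_cons, List.map_append, List.sum_append, List.map_cons,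
    List.map_nil, List.sum_cons, List.sum_nil]
  ring

theorem mainloop (l : List (List Int)) : ∀ (n : Nat) (i : Int) (best : Int × Int × Int) (w : Int),
    w = P l i →
    (PySem.List.pyRange i (i + (n : Int)) 1).foldl
      (fun st i =>
        let potholes := (PySem.List.pyRange i (i + stretchWidth) 1).foldl
          (fun p j => p + getHoles l j) 0
        if potholes > st.1 then (potholes, i, i + stretchWidth) else st)
      best
    = ((PySem.List.pyRange i (i + (n : Int)) 1).foldl
        (fun (st : (Int × Int × Int) × Int) i =>
          (if st.2 > st.1.1 then (st.2, i, i + stretchWidth) else st.1,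
           st.2 + getHoles l (i + stretchWidth) - getHoles l i))
        (best, w)).1 := by
  intro n
  induction n with
  | zero =>
    intro i best w hw
    rw [Nat.cast_zero, add_zero, PySem.List.pyRange_one_eq_nil (le_refl i)]
    rfl
  | succ n ih =>
    intro i best w hw
    subst hw
    have hcast : i + ((n + 1 : Nat) : Int) = (i + 1) + (n : Int) := by push_cast; ring
    have hlt : i < (i + 1) + (n : Int) := by omega
    rw [hcast, PySem.List.pyRange_one_cons hlt, List.foldl_cons, List.foldl_cons]
    show (PySem.List.pyRange (i + 1) ((i + 1) + (n : Int)) 1).foldl _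
        (if P l i > best.1 then (P l i, i, i + stretchWidth) else best)
      = ((PySem.List.pyRange (i + 1) ((i + 1) + (n : Int)) 1).foldl _
        ((if P l i > best.1 then (P l i, i, i + stretchWidth) else best),
          P l i + getHoles l (i + stretchWidth) - getHoles l i)).1
    exact ih (i + 1) _ _ (P_slide l i).symm

-- ===== VERDICT (by name: the statement is the Claim_ definition above) =====
theorem lo_le_hi (l : List (List Int)) (hne : l ≠ []) : getMinBlock l ≤ getMaxBlock l := by
  obtain ⟨b, hb⟩ := List.exists_mem_of_ne_nil l hne
  have hb' : b.headI ∈ l.map List.headI := List.mem_map_of_mem hb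
  have h1 := (foldl_min_spec (l.map List.headI) 100000000).2.2 _ hb'
  have h2 := (foldl_max_spec (l.map List.headI) (-1000000000)).2.2 _ hb'
  rw [getMinBlock_eq, getMaxBlock_eq]
  omega

theorem bestStretch_spec : Claim_equal_bestStretch := by
  intro l hdom hpre
  unfold Spec_bestStretch
  by_cases hne : l = []
  · subst hne
    rw [bestStretch_alt, if_pos rfl, bestStretch]
    rw [show getMinBlock [] = 100000000 from rfl, show getMaxBlock [] = (-1000000000 : Int) from rfl,
      PySem.List.pyRange_one_eq_nil (by norm_num)]
    rfl
  · obtain ⟨hlen, hex⟩ := hpre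
    obtain ⟨hex1, hex2⟩ := hex hne
    have halt : bestStretch_alt l =
        ((PySem.List.pyRange (getMinBlock l) (getMaxBlock l) 1).foldl
          (fun (st : (Int × Int × Int) × Int) i =>
            (if st.2 > st.1.1 then (st.2, i, i + stretchWidth) else st.1,
             st.2 + getHoles l (i + stretchWidth) - getHoles l i))
          ((0, 0, 0),
            (PySem.List.pyRange (getMinBlock l) (getMinBlock l + stretchWidth) 1).foldl
              (fun w j => w + getHoles l j) 0)).1 := by
      rw [bestStretch_alt, if_neg hne]
      have hb : (l.foldl
          (fun d block =>
            PySem.Dict.setdefault d ((PySem.List.pyGet? block 0).getD 0) ((PySem.List.pyGet? block 1).getD 0))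
          PySem.Dict.empty) = buildD l := rfl
      simp only [hb, min?_keys_eq l hne hex1, max?_keys_eq l hne hex2, Option.getD_some, buildD_getD]
    rw [halt, bestStretch]
    have hle := lo_le_hi l hne
    have hn : getMaxBlock l = getMinBlock l + ((getMaxBlock l - getMinBlock l).toNat : Int) := by omega
    rw [hn]
    exact mainloop l _ (getMinBlock l) (0, 0, 0) _ rfl
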